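-- pv_equiv track=rewrite | github.com/BrettDutka/Python-Programs-Projects | Functions, Math Operations, Conditionals, and Loops/Math problem solving.py | go_fund_me
-- ===== SOURCE A (Python) =====
-- def go_fund_me(amt, donations):
--     if amt <= 0:
--         return amt, donations, -amt
--     totalAmount = 0
--     newDonations = []
--     for values in donations:
--         if totalAmount < amt:
--             totalAmount += values
--         else:
--             newDonations.append(values)
--     remaining_donations = totalAmount - amt
--     return amt, newDonations, remaining_donations
-- ===== SOURCE B (Python) =====
-- def go_fund_me(amt, donations):
--     if amt <= 0:
--         return amt, donations, -amt
--     total = 0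
--     k = 0
--     for v in donations:
--         if total >= amt:
--             break
--         total += v
--         k += 1
--     return amt, list(donations[k:]), total - amt
-- ===== Notes on version B (the rewrite author's own statement) =====
-- stated objective: alternative
-- what changed: B finds the split boundary first (break at the first index whose running prefix sum already reaches amt) and then takes a single tail slice, instead of A's interleaved accumulate-or-append over every element.
import Mathlib
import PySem

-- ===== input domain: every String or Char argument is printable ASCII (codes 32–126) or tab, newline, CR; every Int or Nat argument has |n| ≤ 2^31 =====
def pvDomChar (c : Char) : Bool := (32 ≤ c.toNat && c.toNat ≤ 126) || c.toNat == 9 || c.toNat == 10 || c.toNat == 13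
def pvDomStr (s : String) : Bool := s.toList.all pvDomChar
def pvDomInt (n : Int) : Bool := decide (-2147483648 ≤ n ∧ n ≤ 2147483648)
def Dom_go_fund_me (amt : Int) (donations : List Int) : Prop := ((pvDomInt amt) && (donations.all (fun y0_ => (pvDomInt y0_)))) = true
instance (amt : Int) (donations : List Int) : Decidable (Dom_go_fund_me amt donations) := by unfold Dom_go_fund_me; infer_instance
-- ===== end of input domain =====

-- B finds the split boundary first (break at the first prefix sum reaching amt) and then slices the tail,
-- instead of A's interleaved accumulate-or-append loop; same cost (alternative decomposition).


-- ===== PORT A =====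
-- A's loop over donations with state (totalAmount, newDonations)
def go_fund_me (amt : Int) (donations : List Int) : Int × List Int × Int :=
  if amt ≤ 0 then (amt, donations, -amt)
  else
    let st := donations.foldl
      (fun (s : Int × List Int) v => if s.1 < amt then (s.1 + v, s.2) else (s.1, s.2 ++ [v]))
      (0, [])
    (amt, st.2, st.1 - amt)

-- ===== PORT B =====
-- B's boundary-finding loop: running total and index k, breaking once total ≥ amt
def goFundMeFind (amt : Int) : List Int → Int → Nat → Int × Nat
  | [], total, k => (total, k)
  | v :: rest, total, k =>
      if total ≥ amt then (total, k) else goFundMeFind amt rest (total + v) (k + 1)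

def go_fund_me_alt (amt : Int) (donations : List Int) : Int × List Int × Int :=
  if amt ≤ 0 then (amt, donations, -amt)
  else
    let tk := goFundMeFind amt donations 0 0
    (amt, donations.drop tk.2, tk.1 - amt)

-- ===== PRECONDITION & SPEC =====
def Spec_go_fund_me (amt : Int) (donations : List Int) (out : Int × List Int × Int) : Prop := out = go_fund_me_alt amt donations
instance (amt : Int) (donations : List Int) (out : Int × List Int × Int) : Decidable (Spec_go_fund_me amt donations out) := by unfold Spec_go_fund_me; infer_instance

-- ===== CLAIM (what is proved, stated in full; the proofs are below) =====
def Claim_equal_go_fund_me : Prop := ∀ (amt : Int) (donations : List Int), Dom_go_fund_me amt donations → Spec_go_fund_me amt donations (go_fund_me amt donations)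

-- ===== LEMMAS AND PROOFS =====
theorem goFundMeFind_shift (amt : Int) (l : List Int) (t : Int) (k : Nat) :
    goFundMeFind amt l t (k + 1) = ((goFundMeFind amt l t k).1, (goFundMeFind amt l t k).2 + 1) := by
  induction l generalizing t k with
  | nil => simp [goFundMeFind]
  | cons v rest ih =>
      simp only [goFundMeFind]
      split
      · rfl
      · exact ih (t + v) (k + 1)

theorem goFundMe_foldl_ge (amt : Int) (l : List Int) (t : Int) (nd : List Int) (h : ¬ t < amt) :
    l.foldl (fun (s : Int × List Int) v => if s.1 < amt then (s.1 + v, s.2) else (s.1, s.2 ++ [v])) (t, nd)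
      = (t, nd ++ l) := by
  induction l generalizing nd with
  | nil => simp
  | cons v rest ih =>
      simp only [List.foldl_cons, if_neg h]
      rw [ih (nd ++ [v])]
      simp

theorem goFundMe_loop_eq (amt : Int) (l : List Int) (t : Int) (nd : List Int) :
    l.foldl (fun (s : Int × List Int) v => if s.1 < amt then (s.1 + v, s.2) else (s.1, s.2 ++ [v])) (t, nd)
      = ((goFundMeFind amt l t 0).1, nd ++ l.drop (goFundMeFind amt l t 0).2) := by
  induction l generalizing t nd with
  | nil => simp [goFundMeFind]
  | cons v rest ih =>
      by_cases h : t < amt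
      · simp only [List.foldl_cons, if_pos h, goFundMeFind, if_neg (not_le.mpr h)]
        rw [ih (t + v) nd, goFundMeFind_shift]
        simp
      · simp only [goFundMeFind, if_pos (not_lt.mp h)]
        rw [goFundMe_foldl_ge amt (v :: rest) t nd h]
        simp

-- ===== VERDICT (by name: the statement is the Claim_ definition above) =====
theorem go_fund_me_spec : Claim_equal_go_fund_me := by
  intro amt donations _
  unfold Spec_go_fund_me go_fund_me go_fund_me_alt
  by_cases h : amt ≤ 0
  · simp [h]
  · simp only [if_neg h]
    rw [goFundMe_loop_eq]
    simp
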